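-- pv_equiv track=rewrite | github.com/tsoiferm/Music-Recommendation-Program | musicrecplus.py | userLikesMost
-- ===== SOURCE A (Python) =====
-- def userLikesMost(userMap):
--     '''gets the user with the most likes'''
--     userArtNum = {}
--     for user in list(userMap):
--         if '$' not in user:
--             score = 0
--             for i in userMap[user]:
--                 score += 1
--             userArtNum[user] = score
--     first = None
--     firstScore = 0
--     for user in list(userArtNum):
--         if userArtNum[user] > firstScore:
--             firstScore = userArtNum[user]
--             first = user
--     return first
-- ===== SOURCE B (Python) =====
-- def userLikesMost(userMap):
--     '''gets the user with the most likes'''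
--     bestUser = None
--     bestScore = 0
--     for user, artists in userMap.items():
--         if '$' in user:
--             continue
--         score = len(artists)
--         if score > bestScore:
--             bestScore = score
--             bestUser = user
--     return bestUser
-- ===== Notes on version B (the rewrite author's own statement) =====
-- stated objective: simpler
-- what changed: Single pass over the dict items with a running best (user, score) pair, instead of A's two passes that first build an intermediate user->count dict (via key iteration and re-lookup) and then scan it for the maximum.
import Mathlib
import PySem

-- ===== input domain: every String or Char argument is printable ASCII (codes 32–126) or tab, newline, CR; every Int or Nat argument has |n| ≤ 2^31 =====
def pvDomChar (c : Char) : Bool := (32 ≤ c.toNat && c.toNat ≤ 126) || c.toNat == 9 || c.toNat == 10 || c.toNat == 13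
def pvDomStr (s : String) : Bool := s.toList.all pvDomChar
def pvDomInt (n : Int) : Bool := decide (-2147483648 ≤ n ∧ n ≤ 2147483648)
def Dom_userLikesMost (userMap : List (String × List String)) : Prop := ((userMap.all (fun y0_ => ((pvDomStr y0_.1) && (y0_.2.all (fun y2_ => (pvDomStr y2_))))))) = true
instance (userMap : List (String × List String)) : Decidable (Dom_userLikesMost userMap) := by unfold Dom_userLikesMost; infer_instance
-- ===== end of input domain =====

-- B replaces A's two passes (build a user→count dict by key iteration + re-lookup, then scan it
-- for the maximum) with one pass over the items keeping a running best pair; objective: simpler.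

-- ===== PORT A =====
def userLikesMost (userMap : List (String × List String)) : Option String :=
  let d := PySem.Dict.mk userMap
  -- first loop: for user in list(userMap): …  (userMap[user] never misses: user is a key, so getD's default never fires)
  let userArtNum : PySem.Dict String Int :=
    d.keys.foldl (fun acc user =>
      if PySem.Str.isIn "$" user then acc
      else acc.insert user ((d.getD user []).foldl (fun score _ => score + 1) 0))
      PySem.Dict.empty
  -- second loop: for user in list(userArtNum): …
  let res : Option String × Int :=
    userArtNum.keys.foldl (fun st user =>
      if userArtNum.getD user 0 > st.2 then (some user, userArtNum.getD user 0) else st)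
      (none, 0)
  res.1

-- ===== PORT B =====
def userLikesMost_alt (userMap : List (String × List String)) : Option String :=
  (userMap.foldl (fun (st : Option String × Int) kv =>
      if PySem.Str.isIn "$" kv.1 then st
      else if (kv.2.length : Int) > st.2 then (some kv.1, (kv.2.length : Int)) else st)
    (none, 0)).1

-- ===== PRECONDITION & SPEC =====
-- Pre_ excludes association lists with duplicate keys: a Python dict can never hold them, and on
-- such lists A's first-match re-lookup and B's per-entry count are both accidental behaviours.
def Pre_userLikesMost (userMap : List (String × List String)) : Prop :=
  (userMap.map Prod.fst).Nodup
instance (userMap : List (String × List String)) : Decidable (Pre_userLikesMost userMap) := by unfold Pre_userLikesMost; infer_instance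

def pvWitness_userLikesMost : (List (String × List String)) :=
  [("alice", ["a", "b"]), ("bob", ["c"]), ("c$rol", ["d", "e", "f"])]

def Spec_userLikesMost (userMap : List (String × List String)) (out : Option String) : Prop := out = userLikesMost_alt userMap
instance (userMap : List (String × List String)) (out : Option String) : Decidable (Spec_userLikesMost userMap out) := by unfold Spec_userLikesMost; infer_instance

-- ===== CLAIM (what is proved, stated in full; the proofs are below) =====
def Claim_equal_userLikesMost : Prop := ∀ (userMap : List (String × List String)), Dom_userLikesMost userMap → Pre_userLikesMost userMap → Spec_userLikesMost userMap (userLikesMost userMap)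

-- ===== LEMMAS AND PROOFS =====

-- counting loop of A = length
theorem pv_count_foldl (l : List String) (n : Int) :
    l.foldl (fun score _ => score + 1) n = n + l.length := by
  induction l generalizing n with
  | nil => simp
  | cons x xs ih => simp [List.foldl_cons, ih]; ring

-- A's first loop builds exactly the filtered, length-annotated item list
theorem pv_build_items (l : List (String × List String)) (acc : PySem.Dict String Int)
    (hnd : (l.map Prod.fst).Nodup)
    (hfresh : ∀ kv ∈ l, acc.contains kv.1 = false) :
    (l.foldl (fun acc kv =>
        if PySem.Str.isIn "$" kv.1 then acc
        else acc.insert kv.1 (kv.2.length : Int)) acc).items =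
      acc.items ++ (l.filter (fun kv => !PySem.Str.isIn "$" kv.1)).map
        (fun kv => (kv.1, (kv.2.length : Int))) := by
  induction l generalizing acc with
  | nil => simp
  | cons kv tl ih =>
    simp only [List.map_cons, List.nodup_cons] at hnd
    rw [List.foldl_cons, List.filter_cons]
    by_cases hdol : PySem.Str.isIn "$" kv.1
    · have := ih acc hnd.2 (fun p hp => hfresh p (List.mem_cons_of_mem _ hp))
      simp only [hdol, if_true, Bool.not_true, Bool.false_eq_true, if_false]
      exact this
    · have hfr : acc.contains kv.1 = false := hfresh kv (List.mem_cons_self ..)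
      have hfresh' : ∀ p ∈ tl, (acc.insert kv.1 (kv.2.length : Int)).contains p.1 = false := by
        intro p hp
        rw [PySem.Dict.contains_insert]
        have hne : p.1 ≠ kv.1 := by
          intro h; exact hnd.1 (h ▸ (List.mem_map.2 ⟨p, hp, rfl⟩))
        simp [hne, hfresh p (List.mem_cons_of_mem _ hp)]
      have := ih (acc.insert kv.1 (kv.2.length : Int)) hnd.2 hfresh'
      simp only [eq_false_of_ne_true hdol, Bool.not_false, if_true, Bool.false_eq_true, if_false]
      rw [this, PySem.Dict.items_insert_of_not_contains acc _ hfr]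
      simp

theorem userLikesMost_eq (userMap : List (String × List String))
    (h : (userMap.map Prod.fst).Nodup) :
    userLikesMost userMap = userLikesMost_alt userMap := by
  simp only [userLikesMost, userLikesMost_alt]
  have hitems : (PySem.Dict.mk userMap).items = userMap := rfl
  have hkeys : (PySem.Dict.mk userMap).keys = userMap.map Prod.fst := rfl
  -- A's building fold: keys-iteration + re-lookup = direct fold over the entries
  have hbuild :
      (PySem.Dict.mk userMap).keys.foldl (fun acc user =>
          if PySem.Str.isIn "$" user then acc
          else acc.insert user (((PySem.Dict.mk userMap).getD user []).foldl
            (fun score _ => score + 1) 0)) PySem.Dict.empty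
      = userMap.foldl (fun acc kv =>
          if PySem.Str.isIn "$" kv.1 then acc
          else acc.insert kv.1 (kv.2.length : Int)) PySem.Dict.empty := by
    rw [hkeys, List.foldl_map]
    refine PySem.List.foldl_congr_mem _ _ _ _ ?_
    intro acc kv hkv
    have hmem : (kv.1, kv.2) ∈ (PySem.Dict.mk userMap).items := by
      rw [hitems]; exact Prod.mk.eta ▸ hkv
    have hget : (PySem.Dict.mk userMap).getD kv.1 [] = kv.2 :=
      PySem.Dict.getD_of_mem_items _ hmem (hkeys ▸ h) _
    rw [hget, pv_count_foldl]
    simp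
  rw [hbuild]
  have hUAN := pv_build_items userMap PySem.Dict.empty h (by simp)
  set uan := userMap.foldl (fun acc kv =>
      if PySem.Str.isIn "$" kv.1 then acc
      else acc.insert kv.1 (kv.2.length : Int)) PySem.Dict.empty with huan
  set flt := userMap.filter (fun kv => !PySem.Str.isIn "$" kv.1) with hflt
  have hUANitems : uan.items = flt.map (fun kv => (kv.1, (kv.2.length : Int))) := by
    rw [hUAN]; rfl
  have hUANkeys : uan.keys = flt.map Prod.fst := by
    show uan.items.map Prod.fst = _
    rw [hUANitems, List.map_map]; rfl
  have hUANnd : uan.keys.Nodup := by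
    rw [hUANkeys]
    exact h.sublist (List.filter_sublist.map Prod.fst)
  -- A's second loop over keys + re-lookup = fold over the items
  have hphase2 :
      uan.keys.foldl (fun (st : Option String × Int) user =>
          if uan.getD user 0 > st.2 then (some user, uan.getD user 0) else st) (none, 0)
      = uan.items.foldl (fun (st : Option String × Int) p =>
          if p.2 > st.2 then (some p.1, p.2) else st) (none, 0) := by
    show (uan.items.map Prod.fst).foldl _ _ = _
    rw [List.foldl_map]
    refine PySem.List.foldl_congr_mem _ _ _ _ ?_
    intro st p hp
    have hget : uan.getD p.1 0 = p.2 :=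
      PySem.Dict.getD_of_mem_items _ (Prod.mk.eta ▸ hp) hUANnd _
    rw [hget]
  rw [hphase2, hUANitems, List.foldl_map]
  -- B's single pass = fold over the filtered list
  have hB : userMap.foldl (fun (st : Option String × Int) kv =>
        if PySem.Str.isIn "$" kv.1 then st
        else if (kv.2.length : Int) > st.2 then (some kv.1, (kv.2.length : Int)) else st) (none, 0)
      = flt.foldl (fun (st : Option String × Int) kv =>
          if (kv.2.length : Int) > st.2 then (some kv.1, (kv.2.length : Int)) else st) (none, 0) := by
    rw [hflt, List.foldl_filter]
    refine PySem.List.foldl_congr_mem _ _ _ _ ?_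
    intro st kv _
    split_ifs with h1 h2 <;> simp_all
  rw [hB]

-- ===== VERDICT (by name: the statement is the Claim_ definition above) =====
theorem userLikesMost_spec : Claim_equal_userLikesMost := by
  intro userMap _ hpre
  exact userLikesMost_eq userMap hpre
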